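-- pv_equiv track=rewrite | github.com/itsmesamster/reduce_app | app/core/utils.py | names_are_equal
-- ===== SOURCE A (Python) =====
-- def names_are_equal(name_1: str, name_2: str) -> bool | None:
--     name_1 = name_1.lower()
--     name_2 = name_2.lower()
--
--     remove = [",", "-"]
--     for r in remove:
--         name_1 = name_1.replace(r, "")
--         name_2 = name_2.replace(r, "")
--
--     if sorted(name_1.split(" ")) == sorted(name_2.split(" ")):
--         return True
-- ===== SOURCE B (Python) =====
-- def names_are_equal(name_1: str, name_2: str) -> bool | None:
--     def tally(name):
--         counts = {}
--         for tok in name.lower().replace(",", "").replace("-", "").split(" "):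
--             counts[tok] = counts.get(tok, 0) + 1
--         return counts
--     t1 = tally(name_1)
--     t2 = tally(name_2)
--     if len(t1) == len(t2) and all(t2.get(tok, 0) == n for tok, n in t1.items()):
--         return True
-- ===== Notes on version B (the rewrite author's own statement) =====
-- stated objective: alternative
-- what changed: A sorts both normalized token lists and compares them; B never sorts: it builds a token->count dictionary for each name in one pass and compares the two dictionaries as multisets (same size, same count per token).
import Mathlib
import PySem

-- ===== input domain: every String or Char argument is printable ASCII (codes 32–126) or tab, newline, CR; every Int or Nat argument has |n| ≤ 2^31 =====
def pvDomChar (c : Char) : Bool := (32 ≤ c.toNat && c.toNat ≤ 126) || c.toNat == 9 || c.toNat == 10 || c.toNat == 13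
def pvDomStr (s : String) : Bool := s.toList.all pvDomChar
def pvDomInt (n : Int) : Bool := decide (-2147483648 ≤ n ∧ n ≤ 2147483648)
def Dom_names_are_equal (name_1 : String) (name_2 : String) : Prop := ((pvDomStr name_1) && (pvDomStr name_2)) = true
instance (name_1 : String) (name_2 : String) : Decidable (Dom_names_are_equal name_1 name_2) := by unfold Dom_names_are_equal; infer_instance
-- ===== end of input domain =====

-- B replaces A's sort-both-token-lists-and-compare by comparing hand-built token-count
-- dictionaries (a multiset comparison, no sorting); same normalization, same True/None contract.

-- ===== PORT A =====
def names_are_equal (name_1 : String) (name_2 : String) : Option Bool :=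
  let n1 := PySem.Str.lower name_1
  let n2 := PySem.Str.lower name_2
  let p := [",", "-"].foldl (fun (q : String × String) r =>
    (PySem.Str.replace q.1 r "", PySem.Str.replace q.2 r "")) (n1, n2)
  -- split? is none only for sep = ""; sep is " " here, so the .getD [] guard never fires
  let t1 := (PySem.Str.split? p.1 " ").getD []
  let t2 := (PySem.Str.split? p.2 " ").getD []
  if PySem.List.sorted t1 id = PySem.List.sorted t2 id then some true else none

-- ===== PORT B =====
def pvTally (name : String) : PySem.Dict String Int :=
  ((PySem.Str.split? (PySem.Str.replace (PySem.Str.replace (PySem.Str.lower name) "," "") "-" "") " ").getD []).foldl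
    (fun d tok => d.insert tok (d.getD tok 0 + 1)) PySem.Dict.empty

def names_are_equal_alt (name_1 : String) (name_2 : String) : Option Bool :=
  let t1 := pvTally name_1
  let t2 := pvTally name_2
  if t1.size == t2.size && t1.items.all (fun kv => t2.getD kv.1 0 == kv.2) then some true
  else none

-- ===== PRECONDITION & SPEC =====
def Spec_names_are_equal (name_1 : String) (name_2 : String) (out : Option Bool) : Prop := out = names_are_equal_alt name_1 name_2
instance (name_1 : String) (name_2 : String) (out : Option Bool) : Decidable (Spec_names_are_equal name_1 name_2 out) := by unfold Spec_names_are_equal; infer_instance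

-- ===== CLAIM (what is proved, stated in full; the proofs are below) =====
def Claim_equal_names_are_equal : Prop := ∀ (name_1 : String) (name_2 : String), Dom_names_are_equal name_1 name_2 → Spec_names_are_equal name_1 name_2 (names_are_equal name_1 name_2)

-- ===== LEMMAS AND PROOFS =====

-- equal sorted lists ↔ the token lists are permutations of each other
theorem pv_sorted_eq_iff_perm (xs ys : List String) :
    PySem.List.sorted xs id = PySem.List.sorted ys id ↔ xs.Perm ys := by
  constructor
  · intro h
    exact (PySem.List.sorted_perm xs id false).symm.trans (h ▸ PySem.List.sorted_perm ys id false)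
  · intro h
    apply List.Perm.eq_of_pairwise (le := fun a b : String => id a ≤ id b)
    · intro a b _ _ hab hba
      exact le_antisymm hab hba
    · exact PySem.List.sorted_pairwise xs id
    · exact PySem.List.sorted_pairwise ys id
    · exact ((PySem.List.sorted_perm xs id false).trans h).trans (PySem.List.sorted_perm ys id false).symm

-- B's dictionary comparison ↔ the token lists are permutations of each other
theorem pv_counter_eq_iff_perm (xs ys : List String) :
    ((PySem.Dict.counter xs).size == (PySem.Dict.counter ys).size &&
      (PySem.Dict.counter xs).items.all
        (fun kv => (PySem.Dict.counter ys).getD kv.1 0 == kv.2)) = true ↔ xs.Perm ys := by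
  have hsz : ∀ zs : List String, (PySem.Dict.counter zs).size = (PySem.Set.ofList zs).length := by
    intro zs
    simp [PySem.Dict.size, PySem.Dict.items_counter]
  rw [Bool.and_eq_true, beq_iff_eq, hsz, hsz, PySem.Dict.items_counter, List.all_map, List.all_eq_true]
  simp only [Function.comp, PySem.Dict.getD_counter, beq_iff_eq, Nat.cast_inj]
  constructor
  · rintro ⟨hlen, hcnt⟩
    rw [List.perm_iff_count]
    intro a
    by_cases ha : a ∈ xs
    · exact (hcnt a ((PySem.Set.mem_ofList xs a).mpr ha)).symm
    · have hsub : PySem.Set.ofList xs ⊆ PySem.Set.ofList ys := by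
        intro k hk
        have hky : k ∈ ys := by
          have := hcnt k hk
          have hkx : k ∈ xs := (PySem.Set.mem_ofList xs k).mp hk
          have : 0 < List.count k ys := by
            rw [this]; exact List.count_pos_iff.mpr hkx
          exact List.count_pos_iff.mp this
        exact (PySem.Set.mem_ofList ys k).mpr hky
      have hperm : (PySem.Set.ofList xs).Perm (PySem.Set.ofList ys) :=
        ((PySem.Set.nodup_ofList xs).subperm hsub).perm_of_length_le (le_of_eq hlen.symm)
      have hay : a ∉ ys := by
        intro hay
        exact ha ((PySem.Set.mem_ofList xs a).mp
          (hperm.mem_iff.mpr ((PySem.Set.mem_ofList ys a).mpr hay)))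
      rw [List.count_eq_zero_of_not_mem ha, List.count_eq_zero_of_not_mem hay]
  · intro h
    have hmem : ∀ a, a ∈ PySem.Set.ofList xs ↔ a ∈ PySem.Set.ofList ys := by
      intro a
      rw [PySem.Set.mem_ofList, PySem.Set.mem_ofList, h.mem_iff]
    refine ⟨((List.perm_ext_iff_of_nodup (PySem.Set.nodup_ofList xs)
        (PySem.Set.nodup_ofList ys)).mpr hmem).length_eq, ?_⟩
    intro a _
    exact (List.perm_iff_count.mp h a).symm

theorem pv_if_eq (xs ys : List String) :
    (if PySem.List.sorted xs id = PySem.List.sorted ys id then (some true : Option Bool) else none)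
    = (if ((PySem.Dict.counter xs).size == (PySem.Dict.counter ys).size &&
        (PySem.Dict.counter xs).items.all
          (fun kv => (PySem.Dict.counter ys).getD kv.1 0 == kv.2)) then some true else none) := by
  by_cases h : xs.Perm ys
  · rw [if_pos ((pv_sorted_eq_iff_perm xs ys).mpr h), if_pos ((pv_counter_eq_iff_perm xs ys).mpr h)]
  · rw [if_neg (fun hc => h ((pv_sorted_eq_iff_perm xs ys).mp hc)),
        if_neg (fun hc => h ((pv_counter_eq_iff_perm xs ys).mp hc))]

-- ===== VERDICT (by name: the statement is the Claim_ definition above) =====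
theorem names_are_equal_spec : Claim_equal_names_are_equal := by
  intro name_1 name_2 _
  unfold Spec_names_are_equal names_are_equal names_are_equal_alt pvTally
  simp only [List.foldl, PySem.Dict.foldl_insert_getD_add_one_eq_counter]
  exact pv_if_eq _ _
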